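-- pv_equiv track=rewrite | github.com/DuyTa506/MCP_From_Scratch | tools/mindmap_utils/formatter.py | get_markdown_depth
-- ===== SOURCE A (Python) =====
-- def get_markdown_depth(markdown: str) -> int:
--     """Get actual maximum depth of markdown mindmap."""
--     if not isinstance(markdown, str):
--         return 0
--
--     lines = markdown.split('\n')
--     max_depth = 0
--
--     for line in lines:
--         line = line.strip()
--         if line.startswith('#'):
--             level = 0
--             for char in line:
--                 if char == '#':
--                     level += 1
--                 else:
--                     break
--             max_depth = max(max_depth, level)
--
--     return max_depth
-- ===== SOURCE B (Python) =====
-- import re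
--
-- # One anchored multiline pattern: at each line start, optional ASCII-domain whitespace
-- # (what str.strip() removes there), then the run of '#' markers.
-- _HEADING = re.compile(r'^[ \t\r]*(#+)', re.MULTILINE)
--
--
-- def get_markdown_depth(markdown: str) -> int:
--     """Get actual maximum depth of markdown mindmap."""
--     if not isinstance(markdown, str):
--         return 0
--     return max(map(len, _HEADING.findall(markdown)), default=0)
-- ===== Notes on version B (the rewrite author's own statement) =====
-- stated objective: idiomatic
-- what changed: Replaced A's per-line strip/startswith plus an inner character-counting loop with a single anchored multiline regex over the whole string (re.findall of r'^[ \t\r]*(#+)') and max over the captured run lengths.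
import Mathlib
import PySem

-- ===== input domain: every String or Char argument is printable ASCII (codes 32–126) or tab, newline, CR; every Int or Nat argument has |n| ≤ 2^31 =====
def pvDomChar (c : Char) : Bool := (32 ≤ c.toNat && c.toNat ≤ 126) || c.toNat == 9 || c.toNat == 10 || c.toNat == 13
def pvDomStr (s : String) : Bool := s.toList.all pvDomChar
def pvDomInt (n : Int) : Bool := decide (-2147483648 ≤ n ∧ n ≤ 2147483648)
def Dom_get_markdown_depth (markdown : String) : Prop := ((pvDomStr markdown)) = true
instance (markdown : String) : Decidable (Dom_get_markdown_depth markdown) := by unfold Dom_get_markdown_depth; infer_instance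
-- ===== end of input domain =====

-- B replaces A's per-line strip/startswith/char-counting loops by one anchored multiline
-- pattern scan over the whole string, taking the longest captured '#'-run (objective: idiomatic).


-- ===== PORT A =====
-- A's inner 'for char in line: if char == '#': level += 1 else: break' loop
def pvCountA : List Char → Int → Int
  | [], level => level
  | c :: t, level => if c = '#' then pvCountA t (level + 1) else level

def get_markdown_depth (markdown : String) : Int :=
  let lines := PySem.Chars.splitOn markdown.toList ['\n']
  lines.foldl
    (fun max_depth line =>
      let line := PySem.Chars.strip line
      if PySem.Chars.startswith line ['#'] then max max_depth (pvCountA line 0)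
      else max_depth)
    0

-- ===== PORT B =====
-- Hand port of Source B's compiled regex r'^[ \t\r]*(#+)' with re.MULTILINE: the pattern is
-- anchored at line starts, so findall visits each line once — skip the [ \t\r]* class,
-- capture the '#'-run if nonempty, resume after the next '\n'.  Exact for this pattern.
def pvIsBWS (c : Char) : Bool := c == ' ' || c == '\t' || c == '\r'

def pvNextLine : List Char → List Char
  | [] => []
  | c :: t => if c = '\n' then t else pvNextLine t

theorem pvNextLine_length_le : ∀ l : List Char, (pvNextLine l).length ≤ l.length := by
  intro l
  induction l with
  | nil => simp [pvNextLine]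
  | cons c t ih =>
    simp only [pvNextLine]
    split
    · simp
    · simp; omega

-- findall: the list of captured-group lengths, one candidate line start at a time
def pvFindAll (cs : List Char) : List Nat :=
  match cs with
  | [] => []
  | c :: t =>
    let run := ((cs.dropWhile pvIsBWS).takeWhile (fun c => c == '#')).length
    (if run = 0 then [] else [run]) ++ pvFindAll (pvNextLine (c :: t))
termination_by cs.length
decreasing_by
  simp only [pvNextLine]
  split
  · simp
  · have := pvNextLine_length_le t; simp; omega

def get_markdown_depth_alt (markdown : String) : Int :=
  -- max(map(len, findall), default=0)
  ((pvFindAll markdown.toList).map (Int.ofNat)).foldl max 0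

-- ===== PRECONDITION & SPEC =====
def Spec_get_markdown_depth (markdown : String) (out : Int) : Prop := out = get_markdown_depth_alt markdown
instance (markdown : String) (out : Int) : Decidable (Spec_get_markdown_depth markdown out) := by unfold Spec_get_markdown_depth; infer_instance

-- ===== CLAIM (what is proved, stated in full; the proofs are below) =====
def Claim_equal_get_markdown_depth : Prop := ∀ (markdown : String), Dom_get_markdown_depth markdown → Spec_get_markdown_depth markdown (get_markdown_depth markdown)

-- ===== LEMMAS AND PROOFS =====

-- proof-side helpers: the '#'-run of one line, and a structural version of split('\n')
def pvRun (cs : List Char) : Nat := ((cs.dropWhile pvIsBWS).takeWhile (fun c => c == '#')).length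

def pvSplitAux (pre : List Char) : List Char → List (List Char)
  | [] => [pre]
  | c :: t => if c = '\n' then pre :: pvSplitAux [] t else pvSplitAux (pre ++ [c]) t

def pvMStep (l : List Char) : List Nat := if pvRun l = 0 then [] else [pvRun l]

theorem pv_go_spec : ∀ (fuel : Nat) (l cur : List Char) (hacc : List (List Char)),
    l.length < fuel →
    PySem.Chars.splitOn.go ['\n'] fuel l cur hacc = hacc.reverse ++ pvSplitAux cur.reverse l := by
  intro fuel
  induction fuel with
  | zero => intro l cur hacc h; omega
  | succ fuel ih =>
    intro l cur hacc h
    cases l with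
    | nil =>
      rw [PySem.Chars.splitOn.go]
      · simp [pvSplitAux]
      · omega
    | cons c rest =>
      rw [PySem.Chars.splitOn.go]
      by_cases hc : c = '\n'
      · rw [if_pos (by simp [hc])]
        rw [show List.drop (['\n'] : List Char).length (c :: rest) = rest from by simp]
        rw [ih rest [] (cur.reverse :: hacc) (by simp at h ⊢; omega)]
        simp [pvSplitAux, hc]
      · rw [if_neg (by simp; exact fun he => hc he.symm)]
        rw [ih rest (c :: cur) hacc (by simp at h ⊢; omega)]
        simp [pvSplitAux, hc]

theorem pv_splitOn_eq (cs : List Char) :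
    PySem.Chars.splitOn cs ['\n'] = pvSplitAux [] cs := by
  unfold PySem.Chars.splitOn
  rw [pv_go_spec (cs.length + 1) cs [] [] (by omega)]
  simp

theorem pv_countA_eq (l : List Char) (n : Int) :
    pvCountA l n = n + ((l.takeWhile (fun c => c == '#')).length : Int) := by
  induction l generalizing n with
  | nil => simp [pvCountA]
  | cons c t ih =>
    simp only [pvCountA, List.takeWhile]
    by_cases hc : c = '#'
    · simp [hc, ih]; omega
    · rw [if_neg hc, show (c == '#') = false from by simp [hc]]
      simp

theorem pv_toNat_inj (a b : Char) : a.toNat = b.toNat ↔ a = b := eq_iff_eq_of_cmp_eq_cmp rfl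

theorem pv_rstrip_eq (c : Char) (t : List Char) :
    PySem.Chars.rstrip (c :: t) =
      if PySem.Chars.rstrip t = [] ∧ PySem.Chars.isspace c then [] else c :: PySem.Chars.rstrip t := by
  simp only [PySem.Chars.rstrip, List.reverse_cons, List.dropWhile_append]
  by_cases h0 : List.dropWhile PySem.Chars.isspace t.reverse = []
  · simp only [h0]
    by_cases hs : PySem.Chars.isspace c
    · simp [List.dropWhile, hs]
    · simp [List.dropWhile, hs]
  · rw [if_neg (by simp [h0]), if_neg (by simp [h0])]
    simp

theorem pv_rstrip_cons (c : Char) (t : List Char) (h : PySem.Chars.isspace c = false) :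
    PySem.Chars.rstrip (c :: t) = c :: PySem.Chars.rstrip t := by
  rw [pv_rstrip_eq, if_neg (by simp [h])]

theorem pv_hash_not_space (c : Char) (h : PySem.Chars.isspace c = true) : (c == '#') = false := by
  by_cases hc : c = '#'
  · subst hc; simp [PySem.Chars.isspace] at h
  · simp [hc]

theorem pv_takeWhile_hash_rstrip (m : List Char) :
    (PySem.Chars.rstrip m).takeWhile (fun c => c == '#') = m.takeWhile (fun c => c == '#') := by
  induction m with
  | nil => rfl
  | cons c t ih =>
    rw [pv_rstrip_eq]
    by_cases hcond : PySem.Chars.rstrip t = [] ∧ PySem.Chars.isspace c = true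
    · rw [if_pos hcond]
      simp only [List.takeWhile]
      rw [pv_hash_not_space c hcond.2]
    · rw [if_neg hcond]
      simp only [List.takeWhile]
      cases hh : (c == '#') with
      | true => simp [ih]
      | false => simp

theorem pv_char_ws (c : Char) (hd : pvDomChar c = true) (hne : c ≠ '\n') :
    PySem.Chars.isspace c = pvIsBWS c := by
  have h10 : c.toNat ≠ 10 := fun h => hne ((pv_toNat_inj c '\n').mp h)
  simp only [pvDomChar, Bool.or_eq_true, Bool.and_eq_true, decide_eq_true_eq, beq_iff_eq] at hd
  simp only [PySem.Chars.isspace, pvIsBWS]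
  rw [show (c == ' ') = decide (c.toNat = 32) from by
        simp only [Bool.beq_eq_decide_eq, decide_eq_decide]; exact (pv_toNat_inj c ' ').symm,
      show (c == '\t') = decide (c.toNat = 9) from by
        simp only [Bool.beq_eq_decide_eq, decide_eq_decide]; exact (pv_toNat_inj c '\t').symm,
      show (c == '\r') = decide (c.toNat = 13) from by
        simp only [Bool.beq_eq_decide_eq, decide_eq_decide]; exact (pv_toNat_inj c '\r').symm]
  apply Bool.eq_iff_iff.mpr
  simp only [Bool.or_eq_true, Bool.and_eq_true, decide_eq_true_eq]
  omega

theorem pv_dropWhile_congr (l : List Char) (h : ∀ c ∈ l, PySem.Chars.isspace c = pvIsBWS c) :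
    l.dropWhile PySem.Chars.isspace = l.dropWhile pvIsBWS := by
  induction l with
  | nil => rfl
  | cons c t ih =>
    simp only [List.dropWhile]
    rw [h c List.mem_cons_self]
    cases pvIsBWS c with
    | true => exact ih fun c hc => h c (List.mem_cons_of_mem _ hc)
    | false => rfl

theorem pv_dropWhile_head (p : Char → Bool) (l : List Char) (c : Char) (t : List Char)
    (h : l.dropWhile p = c :: t) : p c = false := by
  have h2 := List.head_dropWhile_not (l := l) (p := p) (by simp [h])
  simp only [h, List.head_cons] at h2
  simpa using h2

theorem pv_line_step (l : List Char) (b : Int) (hb : 0 ≤ b)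
    (h : ∀ c ∈ l, PySem.Chars.isspace c = pvIsBWS c) :
    (let line := PySem.Chars.strip l
     if PySem.Chars.startswith line ['#'] then max b (pvCountA line 0) else b)
      = max b (pvRun l : Int) := by
  simp only [PySem.Chars.strip, PySem.Chars.lstrip, PySem.Chars.startswith]
  rw [pv_dropWhile_congr l h]
  cases hm : l.dropWhile pvIsBWS with
  | nil =>
    rw [show PySem.Chars.rstrip ([] : List Char) = [] from rfl]
    simp only [List.isPrefixOf]
    simp [pvRun, hm]
    omega
  | cons c t =>
    have hcnb : pvIsBWS c = false := pv_dropWhile_head _ _ _ _ hm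
    have hcmem : c ∈ l := by
      have : c ∈ l.dropWhile pvIsBWS := by rw [hm]; exact List.mem_cons_self
      exact List.dropWhile_sublist pvIsBWS |>.mem this
    have hcns : PySem.Chars.isspace c = false := by rw [h c hcmem]; exact hcnb
    rw [pv_rstrip_cons c t hcns]
    by_cases hc : c = '#'
    · rw [show List.isPrefixOf ['#'] (c :: PySem.Chars.rstrip t) = true from by
          simp [List.isPrefixOf, hc]]
      simp only [if_pos trivial]
      rw [pv_countA_eq]
      rw [show List.takeWhile (fun c => c == '#') (c :: PySem.Chars.rstrip t)
            = c :: List.takeWhile (fun c => c == '#') t from by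
        simp only [List.takeWhile, show (c == '#') = true from by simp [hc]]
        rw [pv_takeWhile_hash_rstrip t]]
      have : pvRun l = (c :: List.takeWhile (fun c => c == '#') t).length := by
        simp only [pvRun, hm, List.takeWhile, show (c == '#') = true from by simp [hc]]
      rw [this]
      simp
    · rw [show List.isPrefixOf ['#'] (c :: PySem.Chars.rstrip t) = false from by
          simp [List.isPrefixOf]; exact fun he => hc he.symm]
      simp only [Bool.false_eq_true, if_false]
      have : pvRun l = 0 := by
        simp [pvRun, hm, show (c == '#') = false from by simp [hc]]
      rw [this]
      simp
      omega

theorem pv_splitAux_mem (cs : List Char) : ∀ (pre l : List Char), l ∈ pvSplitAux pre cs →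
    ∀ c ∈ l, c ∈ pre ∨ (c ∈ cs ∧ c ≠ '\n') := by
  induction cs with
  | nil =>
    intro pre l hl c hc
    simp [pvSplitAux] at hl
    subst hl; exact Or.inl hc
  | cons a t ih =>
    intro pre l hl c hc
    simp only [pvSplitAux] at hl
    by_cases ha : a = '\n'
    · rw [if_pos ha] at hl
      rcases List.mem_cons.mp hl with rfl | hl'
      · exact Or.inl hc
      · rcases ih [] l hl' c hc with h0 | ⟨hm, hne⟩
        · simp at h0
        · exact Or.inr ⟨List.mem_cons_of_mem _ hm, hne⟩
    · rw [if_neg ha] at hl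
      rcases ih (pre ++ [a]) l hl c hc with h0 | ⟨hm, hne⟩
      · rcases List.mem_append.mp h0 with h | h
        · exact Or.inl h
        · simp at h; subst h
          exact Or.inr ⟨List.mem_cons_self, ha⟩
      · exact Or.inr ⟨List.mem_cons_of_mem _ hm, hne⟩

theorem pv_splitAux_no_nl (cs : List Char) (h : '\n' ∉ cs) :
    ∀ pre, pvSplitAux pre cs = [pre ++ cs] := by
  induction cs with
  | nil => simp [pvSplitAux]
  | cons c t ih =>
    intro pre
    simp only [pvSplitAux]
    rw [if_neg (by simp at h; exact fun he => h.1 he.symm)]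
    rw [ih (by simp at h; exact h.2)]
    simp

theorem pv_splitAux_app (l : List Char) (h : '\n' ∉ l) :
    ∀ pre rest, pvSplitAux pre (l ++ '\n' :: rest) = (pre ++ l) :: pvSplitAux [] rest := by
  induction l with
  | nil => simp [pvSplitAux]
  | cons c t ih =>
    intro pre rest
    simp only [List.cons_append, pvSplitAux]
    rw [if_neg (by simp at h; exact fun he => h.1 he.symm)]
    rw [ih (by simp at h; exact h.2)]
    simp

theorem pv_nextLine_app (l : List Char) (h : '\n' ∉ l) (rest : List Char) :
    pvNextLine (l ++ '\n' :: rest) = rest := by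
  induction l with
  | nil => simp [pvNextLine]
  | cons c t ih =>
    simp only [List.cons_append, pvNextLine]
    rw [if_neg (by simp at h; exact fun he => h.1 he.symm)]
    exact ih (by simp at h; exact h.2)

theorem pv_nextLine_no_nl (cs : List Char) (h : '\n' ∉ cs) : pvNextLine cs = [] := by
  induction cs with
  | nil => rfl
  | cons c t ih =>
    simp only [pvNextLine]
    rw [if_neg (by simp at h; exact fun he => h.1 he.symm)]
    exact ih (by simp at h; exact h.2)

theorem pv_takeWhile_app (xs rest : List Char) :
    (xs ++ '\n' :: rest).takeWhile (fun c => c == '#') = xs.takeWhile (fun c => c == '#') := by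
  induction xs with
  | nil => simp [List.takeWhile]
  | cons x t ih =>
    simp only [List.cons_append, List.takeWhile]
    cases x == '#' with
    | true => simp [ih]
    | false => simp

theorem pv_run_app (l rest : List Char) :
    pvRun (l ++ '\n' :: rest) = pvRun l := by
  simp only [pvRun, List.dropWhile_append]
  by_cases h0 : (l.dropWhile pvIsBWS).isEmpty
  · rw [if_pos h0]
    rw [show List.dropWhile pvIsBWS ('\n' :: rest) = '\n' :: rest from by
      simp [List.dropWhile, pvIsBWS]]
    rw [List.isEmpty_iff.mp h0]
    simp [List.takeWhile]
  · rw [if_neg h0]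
    rw [pv_takeWhile_app]

theorem pv_findAll_cons (cs : List Char) (h : cs ≠ []) :
    pvFindAll cs = pvMStep cs ++ pvFindAll (pvNextLine cs) := by
  cases cs with
  | nil => exact absurd rfl h
  | cons c t =>
    rw [pvFindAll]
    rfl

theorem pv_findAll_split (cs : List Char) :
    pvFindAll cs = (pvSplitAux [] cs).flatMap pvMStep := by
  suffices H : ∀ (n : Nat) (cs : List Char), cs.length ≤ n →
      pvFindAll cs = (pvSplitAux [] cs).flatMap pvMStep from H cs.length cs le_rfl
  intro n
  induction n with
  | zero =>
    intro cs hlen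
    have : cs = [] := List.length_eq_zero_iff.mp (Nat.le_zero.mp hlen)
    subst this
    simp [pvFindAll, pvSplitAux, pvMStep, pvRun]
  | succ n ih =>
    intro cs hlen
    cases cs with
    | nil => simp [pvFindAll, pvSplitAux, pvMStep, pvRun]
    | cons c t =>
      by_cases hnl : '\n' ∈ c :: t
      · -- split off the first line
        obtain ⟨rest, hd⟩ : ∃ rest,
            (c :: t).dropWhile (fun x => !(x == '\n')) = '\n' :: rest := by
          cases he : (c :: t).dropWhile (fun x => !(x == '\n')) with
          | nil =>
            exfalso
            have := (List.dropWhile_eq_nil_iff).mp he '\n' hnl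
            simp at this
          | cons e r =>
            have : (!(e == '\n')) = false := pv_dropWhile_head _ _ _ _ he
            simp at this
            exact ⟨r, by rw [this]⟩
        set l := (c :: t).takeWhile (fun x => !(x == '\n')) with hl
        have hsplit : c :: t = l ++ '\n' :: rest := by
          rw [hl, ← hd, List.takeWhile_append_dropWhile]
        have hln : '\n' ∉ l := by
          intro hmem
          have := List.mem_takeWhile_imp hmem
          simp at this
        have hrest : rest.length ≤ n := by
          have hlen2 : (c :: t).length = l.length + (rest.length + 1) := by
            rw [hsplit]; simp
          omega
        rw [hsplit, pv_findAll_cons _ (by simp)]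
        rw [pv_nextLine_app l hln rest]
        rw [show pvMStep (l ++ '\n' :: rest) = pvMStep l from by
          simp [pvMStep, pv_run_app l rest]]
        rw [ih rest hrest]
        rw [pv_splitAux_app l hln [] rest]
        simp
      · rw [pv_findAll_cons _ (by simp), pv_nextLine_no_nl _ hnl]
        rw [show pvFindAll [] = [] from by rw [pvFindAll]]
        rw [pv_splitAux_no_nl _ hnl []]
        simp

theorem pv_fold_B (lines : List (List Char)) : ∀ (b : Int), 0 ≤ b →
    ((lines.flatMap pvMStep).map Int.ofNat).foldl max b
      = lines.foldl (fun b l => max b (pvRun l : Int)) b := by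
  induction lines with
  | nil => intro b _; rfl
  | cons l ls ih =>
    intro b hb
    simp only [List.flatMap_cons, List.map_append, List.foldl_append, List.foldl_cons]
    by_cases h0 : pvRun l = 0
    · rw [show pvMStep l = [] from by simp [pvMStep, h0]]
      simp only [List.map_nil, List.foldl_nil, h0]
      rw [show max b ((0 : Nat) : Int) = b from by omega]
      exact ih b hb
    · rw [show pvMStep l = [pvRun l] from by simp [pvMStep, h0]]
      simp only [List.map_cons, List.map_nil, List.foldl_cons, List.foldl_nil]
      exact ih (max b (pvRun l : Int)) (le_trans hb (le_max_left _ _))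

theorem pv_fold_A (lines : List (List Char)) : ∀ (b : Int), 0 ≤ b →
    (∀ l ∈ lines, ∀ c ∈ l, pvDomChar c = true ∧ c ≠ '\n') →
    lines.foldl
      (fun max_depth line =>
        let line := PySem.Chars.strip line
        if PySem.Chars.startswith line ['#'] then max max_depth (pvCountA line 0)
        else max_depth) b
      = lines.foldl (fun b l => max b (pvRun l : Int)) b := by
  induction lines with
  | nil => intro b _ _; rfl
  | cons l ls ih =>
    intro b hb h
    simp only [List.foldl_cons]
    rw [pv_line_step l b hb (fun c hc =>
      pv_char_ws c (h l List.mem_cons_self c hc).1 (h l List.mem_cons_self c hc).2)]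
    exact ih (max b (pvRun l : Int)) (le_trans hb (le_max_left _ _))
      (fun l' hl' => h l' (List.mem_cons_of_mem _ hl'))

-- ===== VERDICT (by name: the statement is the Claim_ definition above) =====
theorem get_markdown_depth_spec : Claim_equal_get_markdown_depth := by
  intro markdown hdom
  unfold Spec_get_markdown_depth get_markdown_depth get_markdown_depth_alt
  rw [pv_splitOn_eq, pv_findAll_split, pv_fold_B _ 0 le_rfl, pv_fold_A _ 0 le_rfl]
  intro l hl c hc
  rcases pv_splitAux_mem _ _ _ hl c hc with h | ⟨hmem, hne⟩
  · simp at h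
  · refine ⟨?_, hne⟩
    have := hdom
    unfold Dom_get_markdown_depth pvDomStr at this
    exact List.all_eq_true.mp this c hmem
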